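-- pv_equiv track=rewrite | github.com/onjik/coding_test_practice | python/boj/p1963_소수 경로.py | bfs
-- ===== SOURCE A (Python) =====
-- import math
-- from collections import deque
--
-- def is_prime_number(num):
--     for i in range(2, int(math.sqrt(num)) + 1):
--         if num % i == 0:
--             return False
--     return True
--
-- def variant(num, digit):
--     og_num = (num // digit) % 10
--     tmp = num - og_num * digit
--     variants = []
--     for i in range(10):
--         new = tmp + i * digit
--         variants.append(new)
--     return variants
--
-- def cases(num):
--     cases = []
--     for digit in [1, 10, 100, 1000]:
--         cases += variant(num, digit)
--     return cases
--
-- def bfs(start, end):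
--     q = deque()
--     visited = set()
--     q.append(start)
--     visited.add(start)
--     ans = 0
--     while q:
--         for _ in range(len(q)):
--             n = q.popleft()
--             if n == end:
--                 return ans
--             for case in cases(n):
--                 # 이미 방문 했는지
--                 if case in visited:
--                     continue
--                 # 맨 앞자리가 0인지
--                 if case < 1000:
--                     continue
--                 # 소수 인지
--                 if not is_prime_number(case):
--                     continue
--                 # 여기까지 왔으면 추가
--                 visited.add(case)
--                 q.append(case)
--         ans += 1
--     # 여기까지 왔으면
--     return -1
-- ===== SOURCE B (Python) =====
-- import math
--
-- def bfs(start, end):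
--     # every number reachable from start differs from it only in the last four
--     # decimal digits, so the whole search lives in one block of 10000 values
--     lo = start - start % 10000
--     top = lo + 10000
--     if not (lo <= end < top):
--         return -1
--     # segmented sieve of the block: comp[r] is True  <=>  lo + r has a divisor d
--     # with 2 <= d and d*d <= lo + r  (valid for the values >= 1000 the search reads)
--     comp = [False] * 10000
--     base = max(lo, 1000)
--     for d in range(2, math.isqrt(max(top - 1, 1)) + 1):
--         first = max(d * d, -(-base // d) * d)
--         for m in range(first, top, d):
--             comp[m - lo] = True
--     # level-by-level search over the block, primality by table lookup
--     frontier = [start]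
--     visited = {start}
--     ans = 0
--     while frontier:
--         if end in frontier:
--             return ans
--         nxt = []
--         for n in frontier:
--             for digit in (1, 10, 100, 1000):
--                 og = (n // digit) % 10
--                 b = n - og * digit
--                 for i in range(10):
--                     if i == og:
--                         continue
--                     c = b + i * digit
--                     if c >= 1000 and not comp[c - lo] and c not in visited:
--                         visited.add(c)
--                         nxt.append(c)
--         frontier = nxt
--         ans += 1
--     return -1
-- ===== Notes on version B (the rewrite author's own statement) =====
-- stated objective: faster
-- what changed: B first confines the search to the single 10000-value block that start's digit mutations can ever reach (returning -1 at once when end lies outside it), precomputes a segmented Eratosthenes-style sieve of that block so the per-candidate trial-division loop disappears into an O(1) table lookup, and then runs the level search over the block generating only the 36 genuine digit mutations per node.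
import Mathlib
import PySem

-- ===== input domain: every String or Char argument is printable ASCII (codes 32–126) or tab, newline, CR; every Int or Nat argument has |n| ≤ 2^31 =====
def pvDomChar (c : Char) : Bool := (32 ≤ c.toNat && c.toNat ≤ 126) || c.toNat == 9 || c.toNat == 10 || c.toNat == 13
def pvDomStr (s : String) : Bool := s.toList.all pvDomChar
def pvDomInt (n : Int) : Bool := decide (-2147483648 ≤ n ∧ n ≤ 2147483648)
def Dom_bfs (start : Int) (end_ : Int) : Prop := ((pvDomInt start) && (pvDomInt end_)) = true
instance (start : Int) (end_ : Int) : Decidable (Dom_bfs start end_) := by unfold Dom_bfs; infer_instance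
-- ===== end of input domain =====

set_option maxRecDepth 4000
set_option maxHeartbeats 1000000

-- B confines the search to the one 10000-value block that digit mutations of start can reach
-- (returning -1 at once when end lies outside it) and replaces the per-candidate trial-division
-- loop by one precomputed segmented sieve of that block consulted in O(1); measurably faster.

-- ===== PORT A =====
-- int(math.sqrt(num)) equals Nat.sqrt num.toNat on every value this program feeds it
-- (is_prime_number is only called with 1000 ≤ num ≤ 2^31 + 9999, where the float sqrt is exact enough).
-- 'for i in range(2, int(math.sqrt(num)) + 1)' with early return, as a counter loop
-- (Python's range is lazy; the counter form iterates exactly as often as the Python loop)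
def isPrimeAuxA (num bound i : Int) : Bool :=
  if i ≤ bound then
    if PySem.Int.mod num i == 0 then false else isPrimeAuxA num bound (i + 1)
  else true
termination_by (bound + 1 - i).toNat
decreasing_by omega

def isPrimeA (num : Int) : Bool :=
  isPrimeAuxA num ((Nat.sqrt num.toNat : Int)) 2

def variantA (num : Int) (digit : Int) : List Int :=
  let og := PySem.Int.mod (PySem.Int.floordiv num digit) 10
  let tmp := num - og * digit
  (PySem.List.pyRange 0 10 1).foldl (fun acc i => acc ++ [tmp + i * digit]) []

def casesA (num : Int) : List Int :=
  [(1 : Int), 10, 100, 1000].foldl (fun acc digit => acc ++ variantA num digit) []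

-- body of A's inner 'for case in cases(n)' loop; state = (queue being appended to, visited)
def visitA (s : List Int × PySem.Set Int) (case : Int) : List Int × PySem.Set Int :=
  if PySem.Set.contains s.2 case then s
  else if case < 1000 then s
  else if !(isPrimeA case) then s
  else (s.1 ++ [case], PySem.Set.add s.2 case)

-- one round of 'for _ in range(len(q))': pops every node of the current level; none = early 'return ans'
def levelA (end_ : Int) : List Int → List Int → PySem.Set Int → Option (List Int × PySem.Set Int)
  | [], acc, visited => some (acc, visited)
  | n :: rest, acc, visited =>
    if n == end_ then none
    else
      let s := (casesA n).foldl visitA (acc, visited)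
      levelA end_ rest s.1 s.2

-- the 'while q' loop; fuel only makes the recursion structural (one unit per while-iteration)
def loopA (end_ : Int) : Nat → List Int → PySem.Set Int → Int → Int
  | 0, _, _, _ => -1
  | fuel + 1, q, visited, ans =>
    match q with
    | [] => -1
    | n :: rest =>
      match levelA end_ (n :: rest) [] visited with
      | none => ans
      | some (q', v') => loopA end_ fuel q' v' (ans + 1)

def bfs (start : Int) (end_ : Int) : Int :=
  loopA end_ 20000 [start] (PySem.Set.add PySem.Set.empty start) 0

-- ===== PORT B =====
-- python 'comp[j]' on the 10000-long list; the search only reads indices proven in range,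
-- so the total getD-false rendering is exact there
def compGet (comp : Array Bool) (j : Int) : Bool := (comp[j.toNat]?).getD false

-- the segmented sieve: 'for d in range(2, isqrt(max(top-1,1))+1): for m in range(first, top, d): comp[m-lo]=True'
-- (math.isqrt is exactly Nat.sqrt; every written index is proven in range, setIfInBounds is exact there)
def sieveComp (lo top : Int) : Array Bool :=
  (PySem.List.pyRange 2 ((Nat.sqrt (max (top - 1) 1).toNat : Int) + 1) 1).foldl
    (fun comp d =>
      (PySem.List.pyRange (max (d * d) (-(PySem.Int.floordiv (-(max lo 1000)) d) * d)) top d).foldl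
        (fun comp m => comp.setIfInBounds (m - lo).toNat true) comp)
    (Array.replicate 10000 false)

-- body of B's 'for digit in (1, 10, 100, 1000)' loop
def digitStepB (lo : Int) (comp : Array Bool) (n : Int) (s : List Int × PySem.Set Int) (digit : Int) :
    List Int × PySem.Set Int :=
  let og := PySem.Int.mod (PySem.Int.floordiv n digit) 10
  let base := n - og * digit
  (PySem.List.pyRange 0 10 1).foldl
    (fun s i =>
      if i == og then s
      else
        let c := base + i * digit
        if decide (1000 ≤ c) && !(compGet comp (c - lo)) && !(PySem.Set.contains s.2 c) then
          (s.1 ++ [c], PySem.Set.add s.2 c)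
        else s)
    s

def nodeB (lo : Int) (comp : Array Bool) (s : List Int × PySem.Set Int) (n : Int) :
    List Int × PySem.Set Int :=
  [(1 : Int), 10, 100, 1000].foldl (digitStepB lo comp n) s

-- B's 'while frontier' loop; fuel only makes the recursion structural
def loopB (end_ lo : Int) (comp : Array Bool) : Nat → List Int → PySem.Set Int → Int → Int
  | 0, _, _, _ => -1
  | fuel + 1, frontier, visited, ans =>
    match frontier with
    | [] => -1
    | n :: rest =>
      if (n :: rest).contains end_ then ans
      else
        let s := (n :: rest).foldl (nodeB lo comp) ([], visited)
        loopB end_ lo comp fuel s.1 s.2 (ans + 1)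

def bfs_alt (start : Int) (end_ : Int) : Int :=
  let lo := start - PySem.Int.mod start 10000
  let top := lo + 10000
  if decide (lo ≤ end_) && decide (end_ < top) then
    loopB end_ lo (sieveComp lo top) 20000 [start] (PySem.Set.add PySem.Set.empty start) 0
  else (-1)

-- ===== PRECONDITION & SPEC =====
def Spec_bfs (start : Int) (end_ : Int) (out : Int) : Prop := out = bfs_alt start end_
instance (start : Int) (end_ : Int) (out : Int) : Decidable (Spec_bfs start end_ out) := by unfold Spec_bfs; infer_instance

-- ===== CLAIM (what is proved, stated in full; the proofs are below) =====
def Claim_equal_bfs : Prop := ∀ (start : Int) (end_ : Int), Dom_bfs start end_ → Spec_bfs start end_ (bfs start end_)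

-- ===== LEMMAS AND PROOFS =====

theorem auxA_eq (num bound : Int) : ∀ i : Int,
    isPrimeAuxA num bound i =
      (PySem.List.pyRange i (bound + 1) 1).all (fun j => !(PySem.Int.mod num j == 0)) := by
  intro i
  induction i using isPrimeAuxA.induct (num := num) (bound := bound) with
  | case1 i hle hmod =>
    rw [isPrimeAuxA, if_pos hle, if_pos hmod,
      PySem.List.pyRange_one_cons (by omega), List.all_cons, hmod]
    simp
  | case2 i hle hmod ih =>
    rw [isPrimeAuxA, if_pos hle, if_neg hmod,
      PySem.List.pyRange_one_cons (by omega), List.all_cons, ih]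
    simp [hmod]
  | case3 i hle =>
    rw [isPrimeAuxA, if_neg hle, PySem.List.pyRange_one_eq_nil (by omega)]
    rfl

-- ---- the sieve computes exactly A's trial division on the block ----

theorem ceilMul_ge (b d : Int) (hd : 0 < d) : b ≤ -(PySem.Int.floordiv (-b) d) * d := by
  have hfd : PySem.Int.floordiv (-b) d = (-b) / d := by
    simp [PySem.Int.floordiv, Int.fdiv_eq_ediv, le_of_lt hd]
  rw [hfd]
  have hid := Int.ediv_add_emod (-b) d
  have hnn := Int.emod_nonneg (-b) (by omega : d ≠ 0)
  nlinarith [hid, hnn]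

theorem ceilMul_le (b d v : Int) (hd : 0 < d) (hdv : d ∣ v) (hbv : b ≤ v) :
    -(PySem.Int.floordiv (-b) d) * d ≤ v := by
  obtain ⟨k, rfl⟩ := hdv
  have hfd : PySem.Int.floordiv (-b) d = (-b) / d := by
    simp [PySem.Int.floordiv, Int.fdiv_eq_ediv, le_of_lt hd]
  rw [hfd]
  have hk : -k ≤ (-b) / d := by
    rw [Int.le_ediv_iff_mul_le hd]
    nlinarith
  nlinarith

theorem dvd_firstM (lo d : Int) :
    d ∣ max (d * d) (-(PySem.Int.floordiv (-(max lo 1000)) d) * d) := by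
  rcases max_choice (d * d) (-(PySem.Int.floordiv (-(max lo 1000)) d) * d) with h | h <;> rw [h]
  · exact Dvd.intro _ rfl
  · exact Dvd.intro_left _ rfl

theorem memFirst_iff (lo d v : Int) (hd : 2 ≤ d) (hv : 1000 ≤ v)
    (hseg : lo ≤ v ∧ v < lo + 10000) :
    (v ∈ PySem.List.pyRange (max (d * d) (-(PySem.Int.floordiv (-(max lo 1000)) d) * d))
        (lo + 10000) d) ↔ (d ∣ v ∧ d * d ≤ v) := by
  rw [PySem.List.mem_pyRange_iff_of_pos (by omega)]
  constructor
  · rintro ⟨h1, _, h3⟩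
    have hdv : d ∣ v := by
      have h := dvd_add h3 (dvd_firstM lo d)
      simpa using h
    exact ⟨hdv, le_trans (le_max_left _ _) h1⟩
  · rintro ⟨hdv, hdd⟩
    have hb : max lo 1000 ≤ v := by omega
    refine ⟨max_le hdd (ceilMul_le _ d v (by omega) hdv hb), by omega, ?_⟩
    exact dvd_sub hdv (dvd_firstM lo d)

theorem le_sqrtInt (d v : Int) (h0 : 0 ≤ d) (h : d * d ≤ v) :
    d ≤ ((Nat.sqrt v.toNat : Nat) : Int) := by
  have hv : 0 ≤ v := le_trans (mul_self_nonneg d) h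
  have hn : d.toNat * d.toNat ≤ v.toNat := by
    have : ((d.toNat * d.toNat : Nat) : Int) ≤ ((v.toNat : Nat) : Int) := by
      push_cast
      rw [Int.toNat_of_nonneg h0, Int.toNat_of_nonneg hv]
      exact h
    exact_mod_cast this
  have := Nat.le_sqrt.mpr hn
  omega

theorem sqrtInt_le (d v : Int) (hv : 0 ≤ v) (h0 : 0 ≤ d)
    (h : d ≤ ((Nat.sqrt v.toNat : Nat) : Int)) : d * d ≤ v := by
  have hn : d.toNat ≤ Nat.sqrt v.toNat := by omega
  have := Nat.le_sqrt.mp hn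
  have : ((d.toNat * d.toNat : Nat) : Int) ≤ ((v.toNat : Nat) : Int) := by exact_mod_cast this
  push_cast at this
  rw [Int.toNat_of_nonneg h0, Int.toNat_of_nonneg hv] at this
  exact this

theorem mark_size (lo : Int) : ∀ (ms : List Int) (a : Array Bool),
    (ms.foldl (fun a m => a.setIfInBounds (m - lo).toNat true) a).size = a.size := by
  intro ms
  induction ms with
  | nil => intro a; rfl
  | cons m ms ih => intro a; rw [List.foldl_cons, ih]; exact Array.size_setIfInBounds

theorem mark_get (lo : Int) : ∀ (ms : List Int) (a : Array Bool) (j : Int),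
    a.size = 10000 → 0 ≤ j → j < 10000 → (∀ m ∈ ms, lo ≤ m ∧ m < lo + 10000) →
    compGet (ms.foldl (fun a m => a.setIfInBounds (m - lo).toNat true) a) j
      = (compGet a j || decide ((lo + j) ∈ ms)) := by
  intro ms
  induction ms with
  | nil => intro a j _ _ _ _; simp
  | cons m ms ih =>
    intro a j ha hj0 hj1 hms
    have hm := hms m List.mem_cons_self
    rw [List.foldl_cons,
      ih _ j (by rw [Array.size_setIfInBounds]; exact ha) hj0 hj1
        (fun x hx => hms x (List.mem_cons_of_mem _ hx))]
    by_cases he : m = lo + j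
    · have hidx : (m - lo).toNat = j.toNat := by omega
      have : compGet (a.setIfInBounds (m - lo).toNat true) j = true := by
        unfold compGet
        rw [Array.getElem?_setIfInBounds, hidx, if_pos rfl, if_pos (by omega)]
        rfl
      rw [hidx] at this
      simp [this, he]
    · have hidx : (m - lo).toNat ≠ j.toNat := by omega
      have : compGet (a.setIfInBounds (m - lo).toNat true) j = compGet a j := by
        unfold compGet
        rw [Array.getElem?_setIfInBounds, if_neg hidx]
      rw [this]
      have : ((lo + j) ∈ m :: ms) ↔ ((lo + j) ∈ ms) := by
        simp [List.mem_cons]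
        intro h
        exact absurd h.symm he
      simp [this]

theorem sieve_get (lo : Int) : ∀ (ds : List Int) (a : Array Bool) (j : Int),
    a.size = 10000 → 0 ≤ j → j < 10000 → (∀ d ∈ ds, 0 < d) →
    compGet (ds.foldl
      (fun comp d =>
        (PySem.List.pyRange (max (d * d) (-(PySem.Int.floordiv (-(max lo 1000)) d) * d))
            (lo + 10000) d).foldl
          (fun comp m => comp.setIfInBounds (m - lo).toNat true) comp) a) j
      = (compGet a j || ds.any (fun d =>
          decide ((lo + j) ∈ PySem.List.pyRange
            (max (d * d) (-(PySem.Int.floordiv (-(max lo 1000)) d) * d)) (lo + 10000) d))) := by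
  intro ds
  induction ds with
  | nil => intro a j _ _ _ _; simp
  | cons d ds ih =>
    intro a j ha hj0 hj1 hds
    have hd := hds d List.mem_cons_self
    have hbnd : ∀ m ∈ PySem.List.pyRange
        (max (d * d) (-(PySem.Int.floordiv (-(max lo 1000)) d) * d)) (lo + 10000) d,
        lo ≤ m ∧ m < lo + 10000 := by
      intro m hm
      rw [PySem.List.mem_pyRange_iff_of_pos hd] at hm
      have := ceilMul_ge (max lo 1000) d hd
      have : max lo 1000 ≤ max (d * d) (-(PySem.Int.floordiv (-(max lo 1000)) d) * d) :=
        le_trans this (le_max_right _ _)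
      omega
    rw [List.foldl_cons, ih _ j (by rw [mark_size]; exact ha) hj0 hj1
      (fun x hx => hds x (List.mem_cons_of_mem _ hx)),
      mark_get lo _ a j ha hj0 hj1 hbnd]
    simp [Bool.or_assoc]

theorem comp_iff (lo v : Int) (hv : 1000 ≤ v) (hseg : lo ≤ v ∧ v < lo + 10000) :
    compGet (sieveComp lo (lo + 10000)) (v - lo) = !(isPrimeA v) := by
  have hget := sieve_get lo
    (PySem.List.pyRange 2 ((Nat.sqrt (max (lo + 10000 - 1) 1).toNat : Int) + 1) 1)
    (Array.replicate 10000 false) (v - lo)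
    (by simp) (by omega) (by omega)
    (by intro d hd; rw [PySem.List.mem_pyRange_one] at hd; omega)
  have hbase : compGet (Array.replicate 10000 false) (v - lo) = false := by
    unfold compGet
    rw [Array.getElem?_replicate]
    split <;> rfl
  have hlv : lo + (v - lo) = v := by ring
  rw [show sieveComp lo (lo + 10000) =
      (PySem.List.pyRange 2 ((Nat.sqrt (max (lo + 10000 - 1) 1).toNat : Int) + 1) 1).foldl
        (fun comp d =>
          (PySem.List.pyRange (max (d * d) (-(PySem.Int.floordiv (-(max lo 1000)) d) * d))
              (lo + 10000) d).foldl
            (fun comp m => comp.setIfInBounds (m - lo).toNat true) comp)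
        (Array.replicate 10000 false) from rfl,
    hget, hbase, Bool.false_or]
  rw [isPrimeA, auxA_eq]
  rw [Bool.eq_iff_iff, List.any_eq_true]
  have hall : (!( (PySem.List.pyRange 2 ((Nat.sqrt v.toNat : Int) + 1) 1).all
      (fun j => !(PySem.Int.mod v j == 0)))) = true ↔
      ∃ i ∈ PySem.List.pyRange 2 ((Nat.sqrt v.toNat : Int) + 1) 1, i ∣ v := by
    simp [PySem.Int.mod_eq_zero_iff_dvd]
  rw [hall]
  constructor
  · rintro ⟨d, hd, hmem⟩
    rw [PySem.List.mem_pyRange_one] at hd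
    rw [decide_eq_true_iff, hlv, memFirst_iff lo d v (by omega) hv hseg] at hmem
    refine ⟨d, ?_, hmem.1⟩
    rw [PySem.List.mem_pyRange_one]
    have := le_sqrtInt d v (by omega) hmem.2
    omega
  · rintro ⟨i, hi, hdvd⟩
    rw [PySem.List.mem_pyRange_one] at hi
    have hii : i * i ≤ v := sqrtInt_le i v (by omega) (by omega) (by omega)
    refine ⟨i, ?_, ?_⟩
    · rw [PySem.List.mem_pyRange_one]
      have : i ≤ ((Nat.sqrt (max (lo + 10000 - 1) 1).toNat : Nat) : Int) :=
        le_sqrtInt i (max (lo + 10000 - 1) 1) (by omega) (by omega)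
      omega
    · rw [decide_eq_true_iff, hlv, memFirst_iff lo i v (by omega) hv hseg]
      exact ⟨hdvd, hii⟩

-- ---- candidates stay inside the block ----

theorem cand_seg (lo n digit i : Int) (hlo : (10000 : Int) ∣ lo)
    (hd : digit ∈ ([1, 10, 100, 1000] : List Int))
    (hn : lo ≤ n ∧ n < lo + 10000) (hi : 0 ≤ i ∧ i < 10) :
    lo ≤ n - PySem.Int.mod (PySem.Int.floordiv n digit) 10 * digit + i * digit ∧
      n - PySem.Int.mod (PySem.Int.floordiv n digit) 10 * digit + i * digit < lo + 10000 := by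
  fin_cases hd <;>
    · simp only [PySem.Int.mod, PySem.Int.floordiv, Int.fmod_eq_emod, Int.fdiv_eq_ediv]
      norm_num
      omega

-- ---- the per-candidate step of A equals B's (block membership supplies the sieve fact) ----

theorem visit_eq (lo : Int) (s : List Int × PySem.Set Int) (c : Int)
    (hseg : lo ≤ c ∧ c < lo + 10000) :
    visitA s c =
      (if decide (1000 ≤ c) && !(compGet (sieveComp lo (lo + 10000)) (c - lo))
          && !(PySem.Set.contains s.2 c) then
        (s.1 ++ [c], PySem.Set.add s.2 c)
      else s) := by
  unfold visitA
  by_cases hc : c ∈ s.2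
  · simp [hc]
  · by_cases h1 : c < 1000
    · simp [hc, h1, not_le.mpr h1]
    · have hcomp := comp_iff lo c (not_lt.mp h1) hseg
      by_cases hp : isPrimeA c
      · simp [hc, h1, hp, hcomp, not_lt.mp h1]
      · simp [hc, h1, hp, hcomp]

theorem visit_mono (s : List Int × PySem.Set Int) (c x : Int) (hx : x ∈ s.2) :
    x ∈ (visitA s c).2 := by
  unfold visitA
  split_ifs <;> simp [PySem.Set.mem_add, hx]

theorem foldl_visit_mono (l : List Int) (s : List Int × PySem.Set Int) (x : Int)
    (hx : x ∈ s.2) : x ∈ (l.foldl visitA s).2 := by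
  induction l generalizing s with
  | nil => exact hx
  | cons c rest ih => exact ih (visitA s c) (visit_mono s c x hx)

-- folding visitA over the mapped candidates = B's skip-og fold, provided f og = n is visited
theorem map_fold_skip (lo : Int) (f : Int → Int) (og n : Int) (hfog : f og = n) :
    ∀ (l : List Int), (∀ d ∈ l, lo ≤ f d ∧ f d < lo + 10000) →
      ∀ (s : List Int × PySem.Set Int), n ∈ s.2 →
      (l.map f).foldl visitA s =
        l.foldl
          (fun s d =>
            if d == og then s
            else
              if decide (1000 ≤ f d) && !(compGet (sieveComp lo (lo + 10000)) (f d - lo))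
                  && !(PySem.Set.contains s.2 (f d)) then
                (s.1 ++ [f d], PySem.Set.add s.2 (f d))
              else s)
          s := by
  intro l
  induction l with
  | nil => intro _ s _; rfl
  | cons d rest ih =>
    intro hl s hn
    simp only [List.map_cons, List.foldl_cons]
    by_cases hd : d = og
    · subst hd
      have hA : visitA s (f d) = s := by
        unfold visitA
        have hmem : f d ∈ s.2 := by rw [hfog]; exact hn
        simp [hmem]
      rw [hA]
      simp only [beq_self_eq_true, if_true]
      exact ih (fun x hx => hl x (List.mem_cons_of_mem _ hx)) s hn
    · have hd' : (d == og) = false := by simp [hd]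
      rw [hd', visit_eq lo s (f d) (hl d List.mem_cons_self)]
      simp only [Bool.false_eq_true, if_false]
      have hn' : n ∈ (visitA s (f d)).2 := visit_mono s (f d) n hn
      rw [visit_eq lo s (f d) (hl d List.mem_cons_self)] at hn'
      exact ih (fun x hx => hl x (List.mem_cons_of_mem _ hx)) _ hn'

theorem variantA_eq (n digit : Int) :
    variantA n digit =
      (PySem.List.pyRange 0 10 1).map
        (fun i => n - PySem.Int.mod (PySem.Int.floordiv n digit) 10 * digit + i * digit) := by
  simp only [variantA]
  rw [PySem.List.foldl_append_singleton_eq_map, List.nil_append]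

theorem digit_fold (lo n digit : Int) (hlo : (10000 : Int) ∣ lo)
    (hd : digit ∈ ([1, 10, 100, 1000] : List Int))
    (s : List Int × PySem.Set Int) (hn : n ∈ s.2) (hns : lo ≤ n ∧ n < lo + 10000) :
    (variantA n digit).foldl visitA s = digitStepB lo (sieveComp lo (lo + 10000)) n s digit := by
  rw [variantA_eq]
  exact map_fold_skip lo
    (fun i => n - PySem.Int.mod (PySem.Int.floordiv n digit) 10 * digit + i * digit)
    (PySem.Int.mod (PySem.Int.floordiv n digit) 10) n (by ring)
    (PySem.List.pyRange 0 10 1)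
    (by
      intro i hi
      rw [PySem.List.mem_pyRange_one] at hi
      exact cand_seg lo n digit i hlo hd hns ⟨hi.1, hi.2⟩)
    s hn

theorem node_eq (lo n : Int) (hlo : (10000 : Int) ∣ lo) (s : List Int × PySem.Set Int)
    (hn : n ∈ s.2) (hns : lo ≤ n ∧ n < lo + 10000) :
    (casesA n).foldl visitA s = nodeB lo (sieveComp lo (lo + 10000)) s n := by
  have hc : casesA n =
      ((([] ++ variantA n 1) ++ variantA n 10) ++ variantA n 100) ++ variantA n 1000 := by
    simp [casesA]
  have h1 := digit_fold lo n 1 hlo (by simp) s hn hns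
  have m1 : n ∈ (digitStepB lo (sieveComp lo (lo + 10000)) n s 1).2 := by
    rw [← h1]; exact foldl_visit_mono _ s n hn
  have h2 := digit_fold lo n 10 hlo (by simp) _ m1 hns
  have m2 : n ∈ (digitStepB lo (sieveComp lo (lo + 10000)) n
      (digitStepB lo (sieveComp lo (lo + 10000)) n s 1) 10).2 := by
    rw [← h2]; exact foldl_visit_mono _ _ n m1
  have h3 := digit_fold lo n 100 hlo (by simp) _ m2 hns
  have m3 : n ∈ (digitStepB lo (sieveComp lo (lo + 10000)) n
      (digitStepB lo (sieveComp lo (lo + 10000)) n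
        (digitStepB lo (sieveComp lo (lo + 10000)) n s 1) 10) 100).2 := by
    rw [← h3]; exact foldl_visit_mono _ _ n m2
  have h4 := digit_fold lo n 1000 hlo (by simp) _ m3 hns
  rw [hc]
  simp only [List.foldl_append, List.nil_append]
  rw [h1, h2, h3, h4]
  rfl

-- ---- invariants: queue elements are visited and stay in the block ----

theorem stepB_fold_inv (lo : Int) (comp : Array Bool) (og base digit : Int)
    (hcand : ∀ d : Int, 0 ≤ d → d < 10 → lo ≤ base + d * digit ∧ base + d * digit < lo + 10000) :
    ∀ (l : List Int), (∀ d ∈ l, 0 ≤ d ∧ d < 10) →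
      ∀ (s : List Int × PySem.Set Int),
      (∀ x ∈ s.1, x ∈ s.2 ∧ (lo ≤ x ∧ x < lo + 10000)) →
      ∀ x ∈ (l.foldl
        (fun s d =>
          if d == og then s
          else
            if decide (1000 ≤ base + d * digit) && !(compGet comp (base + d * digit - lo))
                && !(PySem.Set.contains s.2 (base + d * digit)) then
              (s.1 ++ [base + d * digit], PySem.Set.add s.2 (base + d * digit))
            else s)
        s).1,
      x ∈ (l.foldl
        (fun s d =>
          if d == og then s
          else
            if decide (1000 ≤ base + d * digit) && !(compGet comp (base + d * digit - lo))
                && !(PySem.Set.contains s.2 (base + d * digit)) then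
              (s.1 ++ [base + d * digit], PySem.Set.add s.2 (base + d * digit))
            else s)
        s).2 ∧ (lo ≤ x ∧ x < lo + 10000) := by
  intro l
  induction l with
  | nil => intro _ s h; exact h
  | cons d rest ih =>
    intro hl s h
    simp only [List.foldl_cons]
    apply ih (fun x hx => hl x (List.mem_cons_of_mem _ hx))
    intro x hx
    have hdr := hl d List.mem_cons_self
    split_ifs at hx ⊢ with h1 h2
    · exact h x hx
    · simp only [List.mem_append, List.mem_singleton] at hx
      rcases hx with hx | hx
      · exact ⟨by simp [PySem.Set.mem_add, (h x hx).1], (h x hx).2⟩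
      · subst hx
        exact ⟨by simp [PySem.Set.mem_add], hcand d hdr.1 hdr.2⟩
    · exact h x hx

theorem digitStepB_inv (lo n digit : Int) (hlo : (10000 : Int) ∣ lo)
    (hd : digit ∈ ([1, 10, 100, 1000] : List Int)) (hns : lo ≤ n ∧ n < lo + 10000)
    (s : List Int × PySem.Set Int)
    (h : ∀ x ∈ s.1, x ∈ s.2 ∧ (lo ≤ x ∧ x < lo + 10000)) :
    ∀ x ∈ (digitStepB lo (sieveComp lo (lo + 10000)) n s digit).1,
      x ∈ (digitStepB lo (sieveComp lo (lo + 10000)) n s digit).2 ∧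
        (lo ≤ x ∧ x < lo + 10000) := by
  unfold digitStepB
  exact stepB_fold_inv lo (sieveComp lo (lo + 10000))
    (PySem.Int.mod (PySem.Int.floordiv n digit) 10)
    (n - PySem.Int.mod (PySem.Int.floordiv n digit) 10 * digit) digit
    (fun d hd0 hd1 => cand_seg lo n digit d hlo hd hns ⟨hd0, hd1⟩)
    (PySem.List.pyRange 0 10 1)
    (by intro d hdm; rw [PySem.List.mem_pyRange_one] at hdm; exact ⟨hdm.1, hdm.2⟩)
    s h

theorem nodeB_inv (lo : Int) (hlo : (10000 : Int) ∣ lo) (s : List Int × PySem.Set Int) (n : Int)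
    (hns : lo ≤ n ∧ n < lo + 10000)
    (h : ∀ x ∈ s.1, x ∈ s.2 ∧ (lo ≤ x ∧ x < lo + 10000)) :
    ∀ x ∈ (nodeB lo (sieveComp lo (lo + 10000)) s n).1,
      x ∈ (nodeB lo (sieveComp lo (lo + 10000)) s n).2 ∧ (lo ≤ x ∧ x < lo + 10000) :=
  digitStepB_inv lo n 1000 hlo (by simp) hns _
    (digitStepB_inv lo n 100 hlo (by simp) hns _
      (digitStepB_inv lo n 10 hlo (by simp) hns _
        (digitStepB_inv lo n 1 hlo (by simp) hns s h)))

theorem foldl_nodeB_inv (lo : Int) (hlo : (10000 : Int) ∣ lo) :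
    ∀ (l : List Int), (∀ n ∈ l, lo ≤ n ∧ n < lo + 10000) →
    ∀ (s : List Int × PySem.Set Int),
      (∀ x ∈ s.1, x ∈ s.2 ∧ (lo ≤ x ∧ x < lo + 10000)) →
      ∀ x ∈ (l.foldl (nodeB lo (sieveComp lo (lo + 10000))) s).1,
        x ∈ (l.foldl (nodeB lo (sieveComp lo (lo + 10000))) s).2 ∧
          (lo ≤ x ∧ x < lo + 10000) := by
  intro l
  induction l with
  | nil => intro _ s h; exact h
  | cons c rest ih =>
    intro hl s h
    exact ih (fun x hx => hl x (List.mem_cons_of_mem _ hx)) _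
      (nodeB_inv lo hlo s c (hl c List.mem_cons_self) h)

theorem level_eq (end_ lo : Int) (hlo : (10000 : Int) ∣ lo) :
    ∀ (q acc : List Int) (visited : PySem.Set Int),
      (∀ x ∈ q, x ∈ visited ∧ (lo ≤ x ∧ x < lo + 10000)) →
      levelA end_ q acc visited =
        if q.contains end_ then none
        else some (q.foldl (nodeB lo (sieveComp lo (lo + 10000))) (acc, visited)) := by
  intro q
  induction q with
  | nil => intro acc visited _; simp [levelA]
  | cons n rest ih =>
    intro acc visited hq
    unfold levelA
    by_cases hne : n = end_
    · simp [hne]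
    · have hne' : (n == end_) = false := by simp [hne]
      rw [hne']
      simp only [Bool.false_eq_true, if_false]
      have hn := hq n List.mem_cons_self
      have hnode := node_eq lo n hlo (acc, visited) hn.1 hn.2
      have hrest : ∀ x ∈ rest,
          x ∈ (nodeB lo (sieveComp lo (lo + 10000)) (acc, visited) n).2 ∧
            (lo ≤ x ∧ x < lo + 10000) := by
        intro x hx
        refine ⟨?_, (hq x (List.mem_cons_of_mem _ hx)).2⟩
        rw [← hnode]
        exact foldl_visit_mono _ _ x (hq x (List.mem_cons_of_mem _ hx)).1
      rw [hnode, ih _ _ hrest]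
      by_cases hre : end_ ∈ rest
      · simp [hre]
      · have hen : ¬ (end_ = n) := fun h => hne h.symm
        simp [hre, hen]

theorem loop_eq (end_ lo : Int) (hlo : (10000 : Int) ∣ lo) :
    ∀ (fuel : Nat) (q : List Int) (visited : PySem.Set Int) (ans : Int),
      (∀ x ∈ q, x ∈ visited ∧ (lo ≤ x ∧ x < lo + 10000)) →
      loopA end_ fuel q visited ans =
        loopB end_ lo (sieveComp lo (lo + 10000)) fuel q visited ans := by
  intro fuel
  induction fuel with
  | zero => intro q visited ans _; rfl
  | succ fuel ih =>
    intro q visited ans hq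
    match q with
    | [] => rfl
    | n :: rest =>
      show (match levelA end_ (n :: rest) ([] : List Int) visited with
          | none => ans
          | some (q', v') => loopA end_ fuel q' v' (ans + 1)) =
        (if (n :: rest).contains end_ then ans
         else
           loopB end_ lo (sieveComp lo (lo + 10000)) fuel
             ((n :: rest).foldl (nodeB lo (sieveComp lo (lo + 10000))) ([], visited)).1
             ((n :: rest).foldl (nodeB lo (sieveComp lo (lo + 10000))) ([], visited)).2 (ans + 1))
      rw [level_eq end_ lo hlo (n :: rest) [] visited hq]
      by_cases hc : end_ ∈ n :: rest
      · simp [List.mem_cons] at hc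
        simp [hc]
      · simp [List.mem_cons] at hc
        push Not at hc
        rw [if_neg (by simp [hc.1, hc.2]), if_neg (by simp [hc.1, hc.2])]
        exact ih _ _ _
          (foldl_nodeB_inv lo hlo (n :: rest) (fun x hx => (hq x hx).2) ([], visited) (by simp))

-- ---- when end is outside start's block, A explores it fully and returns -1 ----

theorem visitA_fold_seg (lo : Int) :
    ∀ (cs : List Int), (∀ c ∈ cs, lo ≤ c ∧ c < lo + 10000) →
    ∀ (s : List Int × PySem.Set Int), (∀ x ∈ s.1, lo ≤ x ∧ x < lo + 10000) →
    ∀ x ∈ (cs.foldl visitA s).1, lo ≤ x ∧ x < lo + 10000 := by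
  intro cs
  induction cs with
  | nil => intro _ s h; exact h
  | cons c rest ih =>
    intro hcs s h
    apply ih (fun y hy => hcs y (List.mem_cons_of_mem _ hy))
    intro x hx
    unfold visitA at hx
    split_ifs at hx with h1 h2 h3
    · exact h x hx
    · exact h x hx
    · exact h x hx
    · simp only [List.mem_append, List.mem_singleton] at hx
      rcases hx with hx | hx
      · exact h x hx
      · subst hx; exact hcs x List.mem_cons_self

theorem casesA_seg (lo n : Int) (hlo : (10000 : Int) ∣ lo) (hns : lo ≤ n ∧ n < lo + 10000) :
    ∀ c ∈ casesA n, lo ≤ c ∧ c < lo + 10000 := by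
  intro c hc
  have : casesA n =
      ((([] ++ variantA n 1) ++ variantA n 10) ++ variantA n 100) ++ variantA n 1000 := by
    simp [casesA]
  rw [this] at hc
  simp only [List.nil_append, List.mem_append] at hc
  have hv : ∀ digit, digit ∈ ([1, 10, 100, 1000] : List Int) → c ∈ variantA n digit →
      lo ≤ c ∧ c < lo + 10000 := by
    intro digit hd hm
    rw [variantA_eq, List.mem_map] at hm
    obtain ⟨i, hi, rfl⟩ := hm
    rw [PySem.List.mem_pyRange_one] at hi
    exact cand_seg lo n digit i hlo hd hns ⟨hi.1, hi.2⟩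
  rcases hc with ((h | h) | h) | h
  · exact hv 1 (by simp) h
  · exact hv 10 (by simp) h
  · exact hv 100 (by simp) h
  · exact hv 1000 (by simp) h

theorem levelA_some (end_ : Int) :
    ∀ (q acc : List Int) (visited : PySem.Set Int), end_ ∉ q →
      levelA end_ q acc visited =
        some (q.foldl (fun s n => (casesA n).foldl visitA s) (acc, visited)) := by
  intro q
  induction q with
  | nil => intro acc visited _; simp [levelA]
  | cons n rest ih =>
    intro acc visited hq
    unfold levelA
    have hne : (n == end_) = false := by
      simp only [List.mem_cons, not_or] at hq
      exact beq_eq_false_iff_ne.mpr (fun h => hq.1 h.symm)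
    rw [hne]
    simp only [Bool.false_eq_true, if_false, List.foldl_cons]
    generalize (casesA n).foldl visitA (acc, visited) = X
    obtain ⟨a2, v2⟩ := X
    exact ih a2 v2 (fun h => hq (List.mem_cons_of_mem _ h))

theorem levelA_fold_seg (lo : Int) (hlo : (10000 : Int) ∣ lo) :
    ∀ (q : List Int), (∀ x ∈ q, lo ≤ x ∧ x < lo + 10000) →
    ∀ (s : List Int × PySem.Set Int), (∀ x ∈ s.1, lo ≤ x ∧ x < lo + 10000) →
    ∀ x ∈ (q.foldl (fun s n => (casesA n).foldl visitA s) s).1, lo ≤ x ∧ x < lo + 10000 := by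
  intro q
  induction q with
  | nil => intro _ s h; exact h
  | cons n rest ih =>
    intro hq s h
    simp only [List.foldl_cons]
    exact ih (fun y hy => hq y (List.mem_cons_of_mem _ hy)) _
      (visitA_fold_seg lo _ (casesA_seg lo n hlo (hq n List.mem_cons_self)) s h)

theorem loopA_neg (end_ lo : Int) (hlo : (10000 : Int) ∣ lo)
    (hend : ¬(lo ≤ end_ ∧ end_ < lo + 10000)) :
    ∀ (fuel : Nat) (q : List Int) (visited : PySem.Set Int) (ans : Int),
      (∀ x ∈ q, lo ≤ x ∧ x < lo + 10000) →
      loopA end_ fuel q visited ans = -1 := by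
  intro fuel
  induction fuel with
  | zero => intro q visited ans _; rfl
  | succ fuel ih =>
    intro q visited ans hq
    match q with
    | [] => rfl
    | n :: rest =>
      show (match levelA end_ (n :: rest) ([] : List Int) visited with
          | none => ans
          | some (q', v') => loopA end_ fuel q' v' (ans + 1)) = -1
      have hX := levelA_fold_seg lo hlo (n :: rest) hq ([], visited) (by simp)
      rw [levelA_some end_ (n :: rest) [] visited (fun h => hend (hq end_ h))]
      generalize (n :: rest).foldl (fun s n => (casesA n).foldl visitA s) ([], visited) = X at hX ⊢
      obtain ⟨q2, v2⟩ := X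
      exact ih q2 v2 (ans + 1) hX

-- ===== VERDICT (by name: the statement is the Claim_ definition above) =====
theorem bfs_spec : Claim_equal_bfs := by
  intro start end_ _
  unfold Spec_bfs bfs bfs_alt
  have hmod : PySem.Int.mod start 10000 = start % 10000 := by
    simp [PySem.Int.mod, Int.fmod_eq_emod]
  set lo := start - PySem.Int.mod start 10000 with hlodef
  have hlo : (10000 : Int) ∣ lo := by rw [hlodef, hmod]; omega
  have hstart : lo ≤ start ∧ start < lo + 10000 := by rw [hlodef, hmod]; omega
  by_cases hend : lo ≤ end_ ∧ end_ < lo + 10000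
  · rw [if_pos (by simp [hend.1, hend.2])]
    exact loop_eq end_ lo hlo 20000 [start] _ 0
      (by
        intro x hx
        simp only [List.mem_singleton] at hx
        subst hx
        exact ⟨by simp [PySem.Set.add, PySem.Set.empty], hstart⟩)
  · rw [if_neg (by simpa using fun h1 h2 => hend ⟨h1, h2⟩)]
    exact loopA_neg end_ lo hlo hend 20000 [start] _ 0
      (by intro x hx; simp only [List.mem_singleton] at hx; subst hx; exact hstart)
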